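-- pv_equiv track=rewrite | github.com/camelCase0/cypherPostQuantum | count.py | add_polynomias
-- ===== SOURCE A (Python) =====
-- def normalize(poly):
--     while poly and poly[-1] == 0:
--         poly.pop()
--     if poly == []:
--         poly.append(0)
--
-- def add_polynomias(poly1,poly2):
--         # Determine the lengths of the input lists
--         poly1 = poly1[::-1]
--         poly2 = poly2[::-1]
--         normalize(poly1)
--         normalize(poly2)
--
--         len1 = len(poly1)
--         len2 = len(poly2)
--
--         # Determine the maximum length to iterate over
--         max_len = max(len1, len2)
--
--         # Initialize result list with zeros
--         result = [0] * max_len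
--
--         # Add corresponding coefficients
--         for i in range(max_len):
--             if i < len1:
--                 result[i] =int(result[i]+poly1[i])%2
--             if i < len2:
--                 result[i] = int(result[i]+poly2[i])%2
--
--         normalize(result)
--
--         result = result[::-1]
--
--         return result
-- ===== SOURCE B (Python) =====
-- def add_polynomias(poly1, poly2):
--     # Pack each polynomial into an integer bitmask (bit i = low-order coefficient i mod 2),
--     # XOR the masks (= GF(2) addition), and unpack the bits high-order first.
--     def mask(p):
--         v = 0
--         for i, c in enumerate(reversed(p)):
--             v |= (c % 2) << i
--         return v
--     x = mask(poly1) ^ mask(poly2)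
--     bits = []
--     while x:
--         bits.append(x & 1)
--         x >>= 1
--     bits.reverse()
--     return bits or [0]
-- ===== Notes on version B (the rewrite author's own statement) =====
-- stated objective: alternative
-- what changed: Replaces the reverse/normalize/padded-elementwise-loop/normalize pipeline with an integer-bitmask representation: each polynomial is folded into an int with bit i = (low-order coefficient i mod 2), the two ints are XORed (= GF(2) addition), and the result list is rebuilt from the XOR's bits high-order first.
import Mathlib
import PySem

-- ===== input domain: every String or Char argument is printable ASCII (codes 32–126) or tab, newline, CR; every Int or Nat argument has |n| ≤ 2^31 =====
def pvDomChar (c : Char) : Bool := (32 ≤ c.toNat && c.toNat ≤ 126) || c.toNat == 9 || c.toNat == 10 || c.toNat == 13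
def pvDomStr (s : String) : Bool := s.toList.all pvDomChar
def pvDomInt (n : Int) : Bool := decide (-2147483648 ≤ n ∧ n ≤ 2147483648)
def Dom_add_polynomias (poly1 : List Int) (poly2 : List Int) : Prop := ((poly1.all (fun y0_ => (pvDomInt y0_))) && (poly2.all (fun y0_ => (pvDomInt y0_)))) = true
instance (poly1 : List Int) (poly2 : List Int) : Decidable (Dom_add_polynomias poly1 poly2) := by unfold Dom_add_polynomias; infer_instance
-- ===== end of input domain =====

-- B packs each polynomial into an integer bitmask of the coefficients mod 2 and adds over GF(2)
-- by a single XOR, instead of A's reverse/normalize/padded-elementwise-loop/normalize pipeline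
-- (objective: alternative algorithm; A mutates only local copies, so no caller-visible side effects).

-- ===== PORT A =====
-- Python's `normalize` pops trailing zeros in place, then replaces an empty list by [0].
-- `pvDropTrail` is the pop-loop (drop trailing zeros), written as structural recursion.
def pvDropTrail : List Int → List Int
  | [] => []
  | x :: xs =>
    match pvDropTrail xs with
    | [] => if x = 0 then [] else [x]
    | ys => x :: ys

def pvNormalize (p : List Int) : List Int :=
  let q := pvDropTrail p
  if q = [] then [0] else q

def add_polynomias (poly1 : List Int) (poly2 : List Int) : List Int :=
  -- poly1[::-1] / poly2[::-1], then normalize(...)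
  let p1 := pvNormalize poly1.reverse
  let p2 := pvNormalize poly2.reverse
  let len1 := p1.length
  let len2 := p2.length
  let maxLen := max len1 len2
  let result := List.replicate maxLen (0 : Int)
  -- for i in range(max_len): guarded in-place updates; the indices are in range, so getD is exact
  let result := (List.range maxLen).foldl (fun res i =>
      let res := if i < len1 then res.set i (PySem.Int.mod (res.getD i 0 + p1.getD i 0) 2) else res
      if i < len2 then res.set i (PySem.Int.mod (res.getD i 0 + p2.getD i 0) 2) else res) result
  let result := pvNormalize result
  result.reverse

-- ===== PORT B =====
-- `mask` folds over enumerate(reversed(p)); its value is a nonnegative Python int throughout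
-- (each |= adds a bit 0 or 1, and c % 2 has a positive divisor), so Nat represents it exactly.
def pvMask (p : List Int) : Nat :=
  (p.reverse.zipIdx).foldl (fun v ci => v ||| ((PySem.Int.mod ci.1 2).toNat <<< ci.2)) 0

-- the `while x: bits.append(x & 1); x >>= 1` loop (x stays a nonnegative int)
def pvLowBits (x : Nat) : List Int :=
  if x = 0 then [] else ((x &&& 1 : Nat) : Int) :: pvLowBits (x >>> 1)
decreasing_by simp [Nat.shiftRight_one]; omega

def add_polynomias_alt (poly1 : List Int) (poly2 : List Int) : List Int :=
  let x := pvMask poly1 ^^^ pvMask poly2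
  let bits := (pvLowBits x).reverse
  if bits = [] then [0] else bits

-- ===== PRECONDITION & SPEC =====
def Spec_add_polynomias (poly1 : List Int) (poly2 : List Int) (out : List Int) : Prop := out = add_polynomias_alt poly1 poly2
instance (poly1 : List Int) (poly2 : List Int) (out : List Int) : Decidable (Spec_add_polynomias poly1 poly2 out) := by unfold Spec_add_polynomias; infer_instance

-- ===== CLAIM (what is proved, stated in full; the proofs are below) =====
def Claim_equal_add_polynomias : Prop := ∀ (poly1 : List Int) (poly2 : List Int), Dom_add_polynomias poly1 poly2 → Spec_add_polynomias poly1 poly2 (add_polynomias poly1 poly2)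

-- ===== LEMMAS AND PROOFS =====

-- the value of a low-order-first 0/1 bit list
def pvToN : List Int → Nat
  | [] => 0
  | b :: w => b.toNat + 2 * pvToN w

-- reference pointwise mod-2 addition (low-order first; tails pass through mod 2)
def pvPadd : List Int → List Int → List Int
  | [], v => v.map (fun c => PySem.Int.mod c 2)
  | x :: u, [] => (x :: u).map (fun c => PySem.Int.mod c 2)
  | x :: u, y :: v => PySem.Int.mod (x + y) 2 :: pvPadd u v

lemma pv_m2_01 (c : Int) : PySem.Int.mod c 2 = 0 ∨ PySem.Int.mod c 2 = 1 := by
  rw [PySem.Int.mod_eq_emod_of_pos (by norm_num)]; omega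

lemma pv_m2_add (x y : Int) :
    PySem.Int.mod (x + y) 2 = PySem.Int.mod (PySem.Int.mod x 2 + PySem.Int.mod y 2) 2 := by
  rw [PySem.Int.mod_eq_emod_of_pos (by norm_num), PySem.Int.mod_eq_emod_of_pos (by norm_num),
      PySem.Int.mod_eq_emod_of_pos (by norm_num), PySem.Int.mod_eq_emod_of_pos (by norm_num),
      ← Int.add_emod]

lemma pv_m2_addl (x y : Int) : PySem.Int.mod (PySem.Int.mod x 2 + y) 2 = PySem.Int.mod (x + y) 2 := by
  rw [PySem.Int.mod_eq_emod_of_pos (by norm_num), PySem.Int.mod_eq_emod_of_pos (by norm_num),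
      PySem.Int.mod_eq_emod_of_pos (by norm_num)]
  omega

-- disjoint or is addition (single-bit case)
lemma pv_or_pow {a : Nat} (i : Nat) (h : a < 2 ^ i) : a ||| 2 ^ i = a + 2 ^ i := by
  induction i generalizing a with
  | zero => interval_cases a; rfl
  | succ i ih =>
    have hb : Nat.bit (a.testBit 0) (a >>> 1) = a := Nat.bit_testBit_zero_shiftRight_one a
    have h2 : 2 ^ (i+1) = Nat.bit false (2 ^ i) := by simp [Nat.bit_val]; ring
    have ha2 : a >>> 1 < 2 ^ i := by
      rw [Nat.shiftRight_one]; rw [pow_succ] at h; omega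
    calc a ||| 2 ^ (i+1) = Nat.bit (a.testBit 0) (a >>> 1) ||| Nat.bit false (2 ^ i) := by rw [hb, ← h2]
      _ = Nat.bit (a.testBit 0 || false) ((a >>> 1) ||| 2 ^ i) := by
            simpa using Nat.bitwise_bit (f := or) (by simp) (a.testBit 0) (a >>> 1) false (2 ^ i)
      _ = a + 2 ^ (i+1) := by
            rw [Bool.or_false, ih ha2, Nat.bit_val]
            rw [Nat.bit_val] at hb
            rw [pow_succ]; omega

-- one bit-level xor step
lemma pv_bit_xor (a b : Bool) (m n : Nat) :
    (a.toNat + 2 * m) ^^^ (b.toNat + 2 * n) = (a ^^ b).toNat + 2 * (m ^^^ n) := by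
  have h := Nat.bitwise_bit (f := bne) (by simp) a m b n
  rw [Nat.bit_val, Nat.bit_val, Nat.bit_val] at h
  have e : (a.toNat + 2 * m) ^^^ (b.toNat + 2 * n) = Nat.bitwise bne (2 * m + a.toNat) (2 * n + b.toNat) := by
    rw [Nat.add_comm (2*m), Nat.add_comm (2*n)]; rfl
  have e2 : m ^^^ n = Nat.bitwise bne m n := rfl
  rw [e, h, e2]
  cases a <;> cases b <;> simp [Nat.add_comm]

-- the mask fold builds the value of the mod-2 bit list
lemma pv_mask_fold (l : List Int) : ∀ (k acc : Nat), acc < 2 ^ k →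
    (l.zipIdx k).foldl (fun v ci => v ||| ((PySem.Int.mod ci.1 2).toNat <<< ci.2)) acc
      = acc + 2 ^ k * pvToN (l.map (fun c => PySem.Int.mod c 2)) := by
  induction l with
  | nil => intro k acc h; simp [pvToN]
  | cons c l ih =>
    intro k acc h
    rw [List.zipIdx_cons, List.foldl_cons]
    have hb : (PySem.Int.mod c 2).toNat = 0 ∨ (PySem.Int.mod c 2).toNat = 1 := by
      rcases pv_m2_01 c with h1 | h1 <;> rw [h1] <;> simp
    have hstep : acc ||| ((PySem.Int.mod c 2).toNat <<< k) = acc + (PySem.Int.mod c 2).toNat * 2 ^ k := by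
      rcases hb with h1 | h1 <;> rw [h1, Nat.shiftLeft_eq]
      · simp
      · rw [one_mul, pv_or_pow k h]
    simp only [hstep]
    rw [ih (k+1) _ (by rcases hb with h1 | h1 <;> rw [h1] <;> rw [pow_succ] <;> omega)]
    simp only [List.map_cons, pvToN]
    ring

lemma pv_mask_eq (p : List Int) : pvMask p = pvToN (p.reverse.map (fun c => PySem.Int.mod c 2)) := by
  rw [pvMask]
  have := pv_mask_fold p.reverse 0 0 (by norm_num)
  simpa using this

-- pointwise mod-2 addition is xor of the values
lemma pv_toN_padd (u : List Int) : ∀ (v : List Int),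
    pvToN (pvPadd u v) = pvToN (u.map (fun c => PySem.Int.mod c 2)) ^^^ pvToN (v.map (fun c => PySem.Int.mod c 2)) := by
  induction u with
  | nil => intro v; simp [pvPadd, pvToN]
  | cons x u ih =>
    intro v
    cases v with
    | nil => simp [pvPadd, pvToN]
    | cons y v =>
      simp only [pvPadd, pvToN, List.map_cons, ih v]
      rcases pv_m2_01 x with hx | hx <;> rcases pv_m2_01 y with hy | hy <;>
        rw [pv_m2_add x y, hx, hy] <;>
        simp only [show ((0:Int) + 0) = 0 by norm_num, show ((0:Int) + 1) = 1 by norm_num,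
          show ((1:Int) + 0) = 1 by norm_num, show ((1:Int) + 1) = 2 by norm_num,
          show PySem.Int.mod 0 2 = 0 from by decide, show PySem.Int.mod 1 2 = 1 from by decide,
          show PySem.Int.mod 2 2 = 0 from by decide, Int.toNat_zero, Int.toNat_one]
      · exact (pv_bit_xor false false (pvToN (List.map (fun c => PySem.Int.mod c 2) u)) (pvToN (List.map (fun c => PySem.Int.mod c 2) v))).symm
      · exact (pv_bit_xor false true (pvToN (List.map (fun c => PySem.Int.mod c 2) u)) (pvToN (List.map (fun c => PySem.Int.mod c 2) v))).symm
      · exact (pv_bit_xor true false (pvToN (List.map (fun c => PySem.Int.mod c 2) u)) (pvToN (List.map (fun c => PySem.Int.mod c 2) v))).symm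
      · exact (pv_bit_xor true true (pvToN (List.map (fun c => PySem.Int.mod c 2) u)) (pvToN (List.map (fun c => PySem.Int.mod c 2) v))).symm

lemma pv_dropTrail_nil_toN : ∀ {u : List Int}, pvDropTrail u = [] →
    pvToN (u.map (fun c => PySem.Int.mod c 2)) = 0 := by
  intro u
  induction u with
  | nil => intro _; simp [pvToN]
  | cons x xs ih =>
    intro h
    rw [pvDropTrail] at h
    cases hx : pvDropTrail xs with
    | nil =>
      rw [hx] at h
      by_cases h0 : x = 0
      · subst h0
        simp only [List.map_cons, pvToN, ih hx]
        norm_num [show PySem.Int.mod 0 2 = 0 from by decide]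
      · rw [if_neg h0] at h; simp at h
    | cons y ys => rw [hx] at h; simp at h

lemma pv_toN_dropTrail (u : List Int) :
    pvToN ((pvDropTrail u).map (fun c => PySem.Int.mod c 2)) = pvToN (u.map (fun c => PySem.Int.mod c 2)) := by
  induction u with
  | nil => rfl
  | cons x xs ih =>
    rw [pvDropTrail]
    cases hx : pvDropTrail xs with
    | nil =>
      have h0 := pv_dropTrail_nil_toN hx
      split_ifs with hx0
      · subst hx0
        simp only [List.map_nil, List.map_cons, pvToN, h0]
        norm_num [show PySem.Int.mod 0 2 = 0 from by decide]
      · simp only [List.map_nil, List.map_cons, pvToN, h0]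
    | cons y ys =>
      rw [hx] at ih
      simp only [List.map_cons, pvToN] at ih ⊢
      omega

lemma pv_toN_normalize (u : List Int) :
    pvToN ((pvNormalize u).map (fun c => PySem.Int.mod c 2)) = pvToN (u.map (fun c => PySem.Int.mod c 2)) := by
  rw [pvNormalize]
  split_ifs with h
  · rw [pv_dropTrail_nil_toN h]
    norm_num [pvToN, show PySem.Int.mod 0 2 = 0 from by decide]
  · exact pv_toN_dropTrail u

lemma pv_padd_mem : ∀ (u v : List Int), ∀ e ∈ pvPadd u v, e = 0 ∨ e = 1 := by
  intro u
  induction u with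
  | nil =>
    intro v e he
    simp only [pvPadd, List.mem_map] at he
    obtain ⟨c, _, rfl⟩ := he
    exact pv_m2_01 c
  | cons x u ih =>
    intro v e he
    cases v with
    | nil =>
      simp only [pvPadd, List.mem_map] at he
      obtain ⟨c, _, rfl⟩ := he
      exact pv_m2_01 c
    | cons y v =>
      rw [pvPadd] at he
      rcases List.mem_cons.mp he with rfl | h
      · exact pv_m2_01 _
      · exact ih v e h

lemma pv_toN_eq_zero_iff : ∀ {w : List Int}, (∀ e ∈ w, e = 0 ∨ e = 1) →
    (pvToN w = 0 ↔ pvDropTrail w = []) := by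
  intro w
  induction w with
  | nil =>
    intro _
    constructor
    · intro _; rfl
    · intro _; rfl
  | cons b w ih =>
    intro h
    have hb := h b (List.mem_cons_self ..)
    have hw := ih (fun e he => h e (List.mem_cons_of_mem _ he))
    rw [pvToN, pvDropTrail]
    constructor
    · intro h0
      have hb0 : b = 0 := by
        rcases hb with rfl | rfl
        · rfl
        · simp at h0
      have : pvToN w = 0 := by rcases hb with rfl | rfl <;> omega
      rw [hw.mp this]
      simp [hb0]
    · intro h0
      cases hx : pvDropTrail w with
      | nil =>
        rw [hx] at h0
        split_ifs at h0 with h1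
        · subst h1; simp [hw.mpr hx]
      | cons y ys => rw [hx] at h0; simp at h0

lemma pv_lowBits_toN : ∀ {w : List Int}, (∀ e ∈ w, e = 0 ∨ e = 1) →
    pvLowBits (pvToN w) = pvDropTrail w := by
  intro w
  induction w with
  | nil =>
    intro _
    show pvLowBits 0 = pvDropTrail []
    rw [pvLowBits]
    rfl
  | cons b w ih =>
    intro h
    have hb := h b (List.mem_cons_self ..)
    have hw : ∀ e ∈ w, e = 0 ∨ e = 1 := fun e he => h e (List.mem_cons_of_mem _ he)
    rw [pvToN, pvDropTrail]
    by_cases h0 : b.toNat + 2 * pvToN w = 0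
    · rw [h0, pvLowBits]
      have hb0 : b = 0 := by rcases hb with rfl | rfl; rfl; simp at h0
      have ht : pvToN w = 0 := by omega
      rw [if_pos rfl, (pv_toN_eq_zero_iff hw).mp ht]
      simp [hb0]
    · rw [pvLowBits, if_neg h0]
      have e1 : ((b.toNat + 2 * pvToN w) &&& 1 : Nat) = b.toNat := by
        rw [Nat.and_one_is_mod]
        rcases hb with rfl | rfl <;> simp
      have e2 : (b.toNat + 2 * pvToN w) >>> 1 = pvToN w := by
        rw [Nat.shiftRight_one]
        rcases hb with rfl | rfl
        · simp
        · simp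
          omega
      rw [e1, e2, ih hw]
      have hbe : ((b.toNat : Nat) : Int) = b := by rcases hb with rfl | rfl <;> rfl
      rw [hbe]
      cases hx : pvDropTrail w with
      | nil =>
        have ht : pvToN w = 0 := (pv_toN_eq_zero_iff hw).mpr hx
        have hb1 : b ≠ 0 := by intro hb0; subst hb0; simp [ht] at h0
        simp [hb1]
      | cons y ys => rfl

lemma pv_padd_length : ∀ (u v : List Int), (pvPadd u v).length = max u.length v.length := by
  intro u
  induction u with
  | nil => intro v; simp [pvPadd]
  | cons x u ih =>
    intro v
    cases v with
    | nil => simp [pvPadd]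
    | cons y v => simp [pvPadd, ih v]

lemma pv_padd_getD : ∀ (u v : List Int) (i : Nat),
    (pvPadd u v).getD i 0 =
      if i < u.length then
        (if i < v.length then PySem.Int.mod (u.getD i 0 + v.getD i 0) 2 else PySem.Int.mod (u.getD i 0) 2)
      else if i < v.length then PySem.Int.mod (v.getD i 0) 2 else 0 := by
  intro u
  induction u with
  | nil =>
    intro v i
    simp only [pvPadd, List.length_nil, Nat.not_lt_zero, if_false]
    split_ifs with h
    · rw [List.getD_eq_getElem _ _ (by simpa using h), List.getD_eq_getElem _ _ h, List.getElem_map]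
    · rw [List.getD_eq_default _ _ (by simpa using h)]
  | cons x u ih =>
    intro v i
    cases v with
    | nil =>
      simp only [pvPadd, List.length_nil, Nat.not_lt_zero, if_false]
      split_ifs with h
      · rw [List.getD_eq_getElem _ _ (by simpa using h), List.getD_eq_getElem _ _ h, List.getElem_map]
      · rw [List.getD_eq_default _ _ (by simpa using h)]
    | cons y v =>
      cases i with
      | zero => simp [pvPadd]
      | succ i =>
        simp only [pvPadd, List.getD_cons_succ, List.length_cons, Nat.add_lt_add_iff_right, ih v i]

-- A's index loop fills in exactly the pointwise mod-2 sum
lemma pv_loop_inv (a b : List Int) : ∀ n, n ≤ max a.length b.length →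
    (List.range n).foldl (fun res i =>
      let res := if i < a.length then res.set i (PySem.Int.mod (res.getD i 0 + a.getD i 0) 2) else res
      if i < b.length then res.set i (PySem.Int.mod (res.getD i 0 + b.getD i 0) 2) else res)
      (List.replicate (max a.length b.length) (0 : Int))
    = (pvPadd a b).take n ++ List.replicate (max a.length b.length - n) 0 := by
  intro n
  induction n with
  | zero => intro _; simp
  | succ n ih =>
    intro hn
    have hnL : n < max a.length b.length := by omega
    rw [List.range_succ, List.foldl_append, List.foldl_cons, List.foldl_nil, ih (by omega)]
    set L := max a.length b.length with hL
    set T := pvPadd a b with hT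
    have hTlen : T.length = L := pv_padd_length a b
    have htake : (T.take n).length = n := by
      rw [List.length_take, hTlen]; omega
    have hle : (T.take n).length ≤ n := le_of_eq htake
    have hrep : List.replicate (L - n) (0 : Int) = 0 :: List.replicate (L - n - 1) 0 := by
      rw [← List.replicate_succ]
      congr 1
      omega
    have hsn : (T.take n ++ List.replicate (L - n) (0 : Int)).getD n 0 = 0 := by
      rw [List.getD_append_right _ _ _ _ hle, htake]
      rw [List.getD_replicate _ (by omega)]
    have hset : ∀ v : Int, (T.take n ++ List.replicate (L - n) (0 : Int)).set n v
        = T.take n ++ v :: List.replicate (L - n - 1) 0 := by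
      intro v
      rw [List.set_append_right _ _ hle, htake, hrep]
      simp
    have hset2 : ∀ v w : Int, (T.take n ++ v :: List.replicate (L - n - 1) (0 : Int)).set n w
        = T.take n ++ w :: List.replicate (L - n - 1) 0 := by
      intro v w
      rw [List.set_append_right _ _ hle, htake]
      simp
    have hget2 : ∀ v : Int, (T.take n ++ v :: List.replicate (L - n - 1) (0 : Int)).getD n 0 = v := by
      intro v
      rw [List.getD_append_right _ _ _ _ hle, htake]
      simp
    have hfin : ∀ v : Int, v = T.getD n 0 →
        T.take n ++ v :: List.replicate (L - n - 1) 0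
          = T.take (n+1) ++ List.replicate (L - (n+1)) 0 := by
      intro v hv
      rw [List.take_add_one, List.getElem?_eq_getElem (by omega)]
      rw [List.getD_eq_getElem _ _ (by omega)] at hv
      rw [hv]
      simp only [Option.toList_some, List.append_assoc, List.singleton_append]
      have : L - n - 1 = L - (n + 1) := by omega
      rw [this]
    have hTn := pv_padd_getD a b n
    rw [← hT] at hTn
    by_cases ha : n < a.length <;> by_cases hb : n < b.length
    · simp only [if_pos ha, if_pos hb, hsn, hset, hget2, hset2]
      apply hfin
      rw [hTn, if_pos ha, if_pos hb, zero_add, pv_m2_addl]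
    · simp only [if_pos ha, if_neg hb, hsn, hset]
      apply hfin
      rw [hTn, if_pos ha, if_neg hb, zero_add]
    · simp only [if_neg ha, if_pos hb, hsn, hset]
      apply hfin
      rw [hTn, if_neg ha, if_pos hb, zero_add]
    · omega

lemma pv_loop (a b : List Int) :
    (List.range (max a.length b.length)).foldl (fun res i =>
      let res := if i < a.length then res.set i (PySem.Int.mod (res.getD i 0 + a.getD i 0) 2) else res
      if i < b.length then res.set i (PySem.Int.mod (res.getD i 0 + b.getD i 0) 2) else res)
      (List.replicate (max a.length b.length) (0 : Int)) = pvPadd a b := by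
  rw [pv_loop_inv a b _ le_rfl]
  simp [List.take_of_length_le (le_of_eq (pv_padd_length a b))]

-- ===== VERDICT (by name: the statement is the Claim_ definition above) =====
theorem add_polynomias_spec : Claim_equal_add_polynomias := by
  intro p q _
  show add_polynomias p q = add_polynomias_alt p q
  rw [add_polynomias, add_polynomias_alt]
  simp only
  set a := pvNormalize p.reverse with hA
  set b := pvNormalize q.reverse with hB
  rw [pv_loop a b]
  have h01 := pv_padd_mem a b
  have hx : pvToN (pvPadd a b) = pvMask p ^^^ pvMask q := by
    rw [pv_toN_padd a b, hA, hB, pv_toN_normalize, pv_toN_normalize, pv_mask_eq, pv_mask_eq]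
  have hdt : pvDropTrail (pvPadd a b) = pvLowBits (pvMask p ^^^ pvMask q) := by
    rw [← hx, pv_lowBits_toN h01]
  rw [pvNormalize]
  simp only [hdt]
  by_cases hnil : pvLowBits (pvMask p ^^^ pvMask q) = []
  · simp [hnil]
  · simp [hnil, List.reverse_eq_nil_iff]
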